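-- pv_equiv track=rewrite | github.com/Flash-LHR/cryptomath2023 | T2/algorithm/optimize_circuit/B/extractor.py | get_expr
-- ===== SOURCE A (Python) =====
-- import copy
--
-- def get_expr(token, lines_token):
--     vis = False
--     expr = set()
--     for line_token in lines_token:
--         if token not in line_token:
--             continue
--         if vis:
--             expr &= line_token
--         else:
--             expr = copy.deepcopy(line_token)
--             vis = True
--     nice_expr = token + ' = ' + token
--     expr.remove(token)
--     expr = sorted(expr)
--     for x in expr:
--         nice_expr += ' + ' + x
--     nice_expr += ';'
--     return nice_expr
-- ===== SOURCE B (Python) =====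
-- def get_expr(token, lines_token):
--     # Count, over all lines containing the token, how often each element occurs;
--     # an element is common to all of them iff its count equals the number of such lines.
--     counts = {}
--     nmatch = 0
--     for lt in lines_token:
--         if token in lt:
--             nmatch += 1
--             for x in lt:
--                 counts[x] = counts.get(x, 0) + 1
--     common = {x for x, c in counts.items() if c == nmatch}
--     common.remove(token)
--     return token + ' = ' + ' + '.join([token] + sorted(common)) + ';'
-- ===== Notes on version B (the rewrite author's own statement) =====
-- stated objective: alternative
-- what changed: Replaces A's iterated destructive set intersection (vis flag + deepcopy + '&=') by a single occurrence counter over the matching lines -- an element is common iff its count equals the number of matching lines -- and the string-accumulating loop by one ' + '.join.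
import Mathlib
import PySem

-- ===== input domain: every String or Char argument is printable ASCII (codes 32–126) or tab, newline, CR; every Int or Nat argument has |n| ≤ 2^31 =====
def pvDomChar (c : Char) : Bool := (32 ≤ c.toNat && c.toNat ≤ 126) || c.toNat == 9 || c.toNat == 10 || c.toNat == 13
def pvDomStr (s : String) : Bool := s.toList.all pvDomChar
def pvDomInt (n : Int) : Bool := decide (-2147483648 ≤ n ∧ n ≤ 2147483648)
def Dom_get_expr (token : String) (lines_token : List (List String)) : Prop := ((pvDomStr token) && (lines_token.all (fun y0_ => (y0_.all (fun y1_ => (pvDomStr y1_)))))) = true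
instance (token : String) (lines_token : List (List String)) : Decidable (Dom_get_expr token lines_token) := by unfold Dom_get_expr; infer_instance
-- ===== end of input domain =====

-- B replaces A's iterated destructive set intersection (vis flag / deepcopy / '&=') by a
-- single occurrence counter over the matching lines — an element is common to all of them
-- iff its count equals the number of matching lines — and A's string-accumulating loop by
-- one ' + '.join (objective: alternative).

-- ===== PORT A =====
def get_expr (token : String) (lines_token : List (List String)) : String :=
  -- vis/expr loop: first matching set is copied, later matching sets are intersected in
  let st := lines_token.foldl
    (fun (s : Bool × List String) line_token =>
      if !List.contains line_token token then s
      else if s.1 then (s.1, PySem.Set.inter s.2 line_token)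
      else (true, line_token))
    (false, ([] : List String))
  match PySem.Set.remove? st.2 token with
  | none => ""  -- Python raises KeyError here (excluded by Pre_)
  | some expr1 =>
    let expr2 := PySem.List.sorted expr1 (fun x => x) false
    let nice := expr2.foldl (fun acc x => acc ++ " + " ++ x) (token ++ " = " ++ token)
    nice ++ ";"

-- ===== PORT B =====
def get_expr_alt (token : String) (lines_token : List (List String)) : String :=
  -- one pass: counts[x] += 1 for every x of every line containing token; nmatch counts those lines
  let st := lines_token.foldl
    (fun (s : PySem.Dict String Int × Int) lt =>
      if List.contains lt token then
        (lt.foldl (fun d x => d.insert x (d.getD x 0 + 1)) s.1, s.2 + 1)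
      else s)
    (PySem.Dict.empty, 0)
  -- common = {x for x, c in counts.items() if c == nmatch}; common.remove(token)
  let common := PySem.Set.ofList ((st.1.items.filter (fun p => p.2 == st.2)).map (·.1))
  match PySem.Set.remove? common token with
  | none => ""  -- Python raises KeyError here (excluded by Pre_)
  | some rest =>
    token ++ " = " ++ PySem.Str.join " + " (token :: PySem.List.sorted rest (fun x => x) false) ++ ";"

-- ===== PRECONDITION & SPEC =====
-- Pre_ excludes exactly (a) the inputs where A (and B alike) raises: when no line contains
-- the token, the common set does not contain it and .remove(token) raises KeyError; and (b) inner lists with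
-- duplicate elements, which under the type convention encode no Python input at all (the
-- lines are Python sets — A applies '&=' and '.remove' to them), so each must be duplicate-free.
def Pre_get_expr (token : String) (lines_token : List (List String)) : Prop :=
  lines_token.any (fun lt => List.contains lt token) = true ∧ ∀ lt ∈ lines_token, lt.Nodup
instance (token : String) (lines_token : List (List String)) : Decidable (Pre_get_expr token lines_token) := by unfold Pre_get_expr; infer_instance

def pvWitness_get_expr : String × List (List String) := ("a", [["b", "a", "c"]])

def Spec_get_expr (token : String) (lines_token : List (List String)) (out : String) : Prop := out = get_expr_alt token lines_token
instance (token : String) (lines_token : List (List String)) (out : String) : Decidable (Spec_get_expr token lines_token out) := by unfold Spec_get_expr; infer_instance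

-- ===== CLAIM (what is proved, stated in full; the proofs are below) =====
def Claim_equal_get_expr : Prop := ∀ (token : String) (lines_token : List (List String)), Dom_get_expr token lines_token → Pre_get_expr token lines_token → Spec_get_expr token lines_token (get_expr token lines_token)

-- ===== LEMMAS AND PROOFS =====

-- A's loop: once vis is true, every further matching line is intersected into expr
lemma foldA_inter (token : String) (lines : List (List String)) (e : List String) :
    lines.foldl
      (fun (s : Bool × List String) line_token =>
        if !List.contains line_token token then s
        else if s.1 then (s.1, PySem.Set.inter s.2 line_token)
        else (true, line_token))
      (true, e)
      = (true, (lines.filter (fun lt => List.contains lt token)).foldl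
          (fun acc lt => PySem.Set.inter acc lt) e) := by
  induction lines generalizing e with
  | nil => rfl
  | cons hd tl ih =>
    rw [List.foldl_cons, List.filter_cons]
    cases h : List.contains hd token with
    | true => simp only [Bool.not_true, if_true]; exact ih _
    | false => simp only [Bool.not_false, if_true]; exact ih e

-- A's whole loop: intersect the matching lines, starting from the first one
lemma foldA_filter (token : String) (lines : List (List String)) :
    lines.foldl
      (fun (s : Bool × List String) line_token =>
        if !List.contains line_token token then s
        else if s.1 then (s.1, PySem.Set.inter s.2 line_token)
        else (true, line_token))
      (false, ([] : List String))
      = match lines.filter (fun lt => List.contains lt token) with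
        | [] => (false, ([] : List String))
        | m0 :: ms => (true, ms.foldl (fun acc lt => PySem.Set.inter acc lt) m0) := by
  induction lines with
  | nil => rfl
  | cons hd tl ih =>
    rw [List.foldl_cons, List.filter_cons]
    cases h : List.contains hd token with
    | true => simp only [Bool.not_true, if_true]; exact foldA_inter token tl hd
    | false => simp only [Bool.not_false, if_true]; exact ih

-- B's loop on the matching lines only: the two accumulators are independent
lemma foldB_pair (L : List (List String)) (d : PySem.Dict String Int) (n : Int) :
    L.foldl
      (fun (s : PySem.Dict String Int × Int) lt =>
        (lt.foldl (fun d x => d.insert x (d.getD x 0 + 1)) s.1, s.2 + 1)) (d, n)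
      = (L.foldl (fun d lt => lt.foldl (fun d x => d.insert x (d.getD x 0 + 1)) d) d,
         n + L.length) := by
  induction L generalizing d n with
  | nil => simp
  | cons hd tl ih =>
    rw [List.foldl_cons, ih, List.foldl_cons, List.length_cons]
    congr 1
    push_cast; ring

-- B's loop: split off the filter and the two independent accumulators
lemma foldB_eq (token : String) (lines : List (List String)) :
    lines.foldl
      (fun (s : PySem.Dict String Int × Int) lt =>
        if List.contains lt token then
          (lt.foldl (fun d x => d.insert x (d.getD x 0 + 1)) s.1, s.2 + 1)
        else s)
      (PySem.Dict.empty, 0)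
      = ((lines.filter (fun lt => List.contains lt token)).foldl
           (fun d lt => lt.foldl (fun d x => d.insert x (d.getD x 0 + 1)) d) PySem.Dict.empty,
         ((lines.filter (fun lt => List.contains lt token)).length : Int)) := by
  rw [PySem.List.foldl_if_eq_foldl_filter (p := fun lt => List.contains lt token)
        (f := fun (s : PySem.Dict String Int × Int) lt =>
          (lt.foldl (fun d x => d.insert x (d.getD x 0 + 1)) s.1, s.2 + 1)),
      foldB_pair]
  simp

-- the nested counting fold, read at one key: it adds the flattened count
lemma getD_nested (L : List (List String)) (d : PySem.Dict String Int) (v : String) :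
    (L.foldl (fun d lt => lt.foldl (fun d x => d.insert x (d.getD x 0 + 1)) d) d).getD v 0
      = d.getD v 0 + (L.flatten.count v : Int) := by
  induction L generalizing d with
  | nil => simp
  | cons hd tl ih =>
    rw [List.foldl_cons, ih, PySem.Dict.getD_foldl_insert_add_one, List.flatten_cons,
        List.count_append]
    push_cast; ring

-- the nested counting fold's keys: first occurrences of the flattened elements
lemma keys_nested (L : List (List String)) (d : PySem.Dict String Int) :
    (L.foldl (fun d lt => lt.foldl (fun d x => d.insert x (d.getD x 0 + 1)) d) d).keys
      = PySem.Set.update d.keys L.flatten := by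
  induction L generalizing d with
  | nil => simp [PySem.Set.update_nil]
  | cons hd tl ih =>
    rw [List.foldl_cons, ih,
        PySem.Dict.keys_foldl_insert (f := fun d x => d.getD x 0 + 1),
        List.flatten_cons, PySem.Set.update_append]

-- membership in A's iterated intersection
lemma mem_foldl_inter (ms : List (List String)) (m0 : List String) (x : String) :
    x ∈ ms.foldl (fun acc lt => PySem.Set.inter acc lt) m0 ↔ x ∈ m0 ∧ ∀ lt ∈ ms, x ∈ lt := by
  induction ms generalizing m0 with
  | nil => simp
  | cons hd tl ih =>
    rw [List.foldl_cons, ih]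
    simp [PySem.Set.mem_inter]
    tauto

lemma nodup_foldl_inter (ms : List (List String)) (m0 : List String) (h : m0.Nodup) :
    (ms.foldl (fun acc lt => PySem.Set.inter acc lt) m0).Nodup := by
  induction ms generalizing m0 with
  | nil => exact h
  | cons hd tl ih => exact ih _ (PySem.Set.nodup_inter _ _ h)

-- with duplicate-free lines, an element occurs in the flattening at most once per line …
lemma count_flatten_le (L : List (List String)) (x : String) (h : ∀ lt ∈ L, lt.Nodup) :
    L.flatten.count x ≤ L.length := by
  induction L with
  | nil => simp
  | cons hd tl ih =>
    rw [List.flatten_cons, List.count_append, List.length_cons]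
    have h1 : hd.count x ≤ 1 := List.nodup_iff_count_le_one.mp (h hd (by simp)) x
    have h2 := ih (fun lt hm => h lt (by simp [hm]))
    omega

-- … so its count equals the number of lines iff it lies in every line
lemma count_flatten_eq_length_iff (L : List (List String)) (x : String)
    (h : ∀ lt ∈ L, lt.Nodup) :
    L.flatten.count x = L.length ↔ ∀ lt ∈ L, x ∈ lt := by
  induction L with
  | nil => simp
  | cons hd tl ih =>
    rw [List.flatten_cons, List.count_append, List.length_cons]
    have h1 : hd.count x ≤ 1 := List.nodup_iff_count_le_one.mp (h hd (by simp)) x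
    have h2 := count_flatten_le tl x (fun lt hm => h lt (by simp [hm]))
    have h3 := ih (fun lt hm => h lt (by simp [hm]))
    have h4 : (0 < hd.count x) ↔ x ∈ hd := List.count_pos_iff
    constructor
    · intro he
      have hc1 : hd.count x = 1 := by omega
      have hc2 : tl.flatten.count x = tl.length := by omega
      intro lt hm
      rcases List.mem_cons.mp hm with rfl | hm'
      · exact h4.mp (by omega)
      · exact h3.mp hc2 lt hm'
    · intro ha
      have hc1 : 0 < hd.count x := h4.mpr (ha hd (by simp))
      have hc2 : tl.flatten.count x = tl.length := h3.mpr (fun lt hm => ha lt (by simp [hm]))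
      omega

-- chars-level: a common prefix of the accumulator pulls out of the joining loop
lemma cfold_prefix (sep : List Char) (l : List (List Char)) (p t : List Char) :
    l.foldl (fun a x => a ++ (sep ++ x)) (p ++ t)
      = p ++ l.foldl (fun a x => a ++ (sep ++ x)) t := by
  induction l generalizing t with
  | nil => rfl
  | cons hd tl ih => simp only [List.foldl_cons, List.append_assoc]; exact ih _

-- chars-level: sep.join(t :: l) is the accumulating loop started at t
lemma cjoin (sep : List Char) (l : List (List Char)) (t : List Char) :
    PySem.Chars.join sep (t :: l) = l.foldl (fun a x => a ++ (sep ++ x)) t := by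
  induction l generalizing t with
  | nil => exact PySem.Chars.join_singleton sep t
  | cons hd tl ih =>
    rw [PySem.Chars.join_cons_cons, ih, ← cfold_prefix, List.append_assoc, List.foldl_cons]

-- A's string loop, moved to the chars level
lemma toList_foldl (l : List String) (t : String) :
    (l.foldl (fun acc x => acc ++ " + " ++ x) t).toList
      = (l.map String.toList).foldl (fun a x => a ++ ((" + " : String).toList ++ x)) t.toList := by
  induction l generalizing t with
  | nil => rfl
  | cons hd tl ih =>
    rw [List.foldl_cons, List.map_cons, List.foldl_cons, ih]
    congr 1
    simp [String.toList_append, List.append_assoc]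

-- ' + '.join(t :: l) is A's accumulating loop started at t
lemma join_eq_foldl (l : List String) (t : String) :
    PySem.Str.join " + " (t :: l) = l.foldl (fun acc x => acc ++ " + " ++ x) t := by
  apply String.toList_injective
  rw [PySem.Str.toList_join, List.map_cons, cjoin, toList_foldl]

-- string-level prefix pull-out, via toList
lemma foldl_prefix (l : List String) (p t : String) :
    l.foldl (fun acc x => acc ++ " + " ++ x) (p ++ t)
      = p ++ l.foldl (fun acc x => acc ++ " + " ++ x) t := by
  apply String.toList_injective
  rw [String.toList_append, toList_foldl, toList_foldl, String.toList_append, cfold_prefix]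

-- ===== VERDICT (by name: the statement is the Claim_ definition above) =====
theorem get_expr_spec : Claim_equal_get_expr := by
  intro token lines_token _ hpre
  obtain ⟨hany, hnodup⟩ := hpre
  unfold Spec_get_expr get_expr get_expr_alt
  cases hf : lines_token.filter (fun lt => List.contains lt token) with
  | nil =>
    exfalso
    obtain ⟨lt, hm, hc⟩ := List.any_eq_true.mp hany
    have : lt ∈ lines_token.filter (fun lt => List.contains lt token) :=
      List.mem_filter.mpr ⟨hm, hc⟩
    rw [hf] at this; simp at this
  | cons m0 ms =>
    -- every matching line contains the token and is duplicate-free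
    have hmatch : ∀ lt ∈ m0 :: ms, token ∈ lt ∧ lt.Nodup := by
      intro lt hm
      have hm' : lt ∈ lines_token.filter (fun lt => List.contains lt token) := hf ▸ hm
      obtain ⟨hmem, hc⟩ := List.mem_filter.mp hm'
      exact ⟨List.contains_iff_mem.mp hc, hnodup lt hmem⟩
    have htok : token ∈ ms.foldl (fun acc lt => PySem.Set.inter acc lt) m0 :=
      (mem_foldl_inter ms m0 token).mpr
        ⟨(hmatch m0 (by simp)).1, fun lt hm => (hmatch lt (by simp [hm])).1⟩
    simp only [foldA_filter, foldB_eq, hf, PySem.Set.remove?_of_mem htok]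
    -- the counter dict, read back
    set F := (m0 :: ms).flatten with hF
    set D : PySem.Dict String Int := (m0 :: ms).foldl
        (fun d lt => lt.foldl (fun d x => d.insert x (d.getD x 0 + 1)) d) PySem.Dict.empty with hD
    have hkeys : D.keys = PySem.Set.ofList F := by
      rw [hD, keys_nested, PySem.Dict.keys_empty, PySem.Set.update_nil_left]
    have hkn : D.keys.Nodup := by rw [hkeys]; exact PySem.Set.nodup_ofList F
    have hget : ∀ v, D.getD v 0 = (F.count v : Int) := by
      intro v; rw [hD, getD_nested, PySem.Dict.getD_empty]; ring
    -- B's comprehension, as a filter over the distinct flattened elements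
    have hitems : (D.items.filter (fun p => p.2 == ((m0 :: ms).length : Int))).map (·.1)
        = (PySem.Set.ofList F).filter
            (fun k => (F.count k : Int) == ((m0 :: ms).length : Int)) := by
      rw [PySem.Dict.items_eq_map_keys D hkn 0, List.filter_map, List.map_map, hkeys]
      have hid : ((fun (x : String × Int) => x.1) ∘ fun k => (k, D.getD k 0)) = fun k => k := rfl
      rw [hid, List.map_id_fun']
      apply List.filter_congr
      intro k _
      simp [hget k]
    have hcnt := fun x => count_flatten_eq_length_iff (m0 :: ms) x (fun lt hm => (hmatch lt hm).2)
    have hnodB : ((PySem.Set.ofList F).filter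
        (fun k => (F.count k : Int) == ((m0 :: ms).length : Int))).Nodup :=
      (PySem.Set.nodup_ofList F).filter _
    have htokB : token ∈ (PySem.Set.ofList F).filter
        (fun k => (F.count k : Int) == ((m0 :: ms).length : Int)) := by
      have hall : ∀ lt ∈ m0 :: ms, token ∈ lt := fun lt hm => (hmatch lt hm).1
      refine List.mem_filter.mpr ⟨(PySem.Set.mem_ofList _ _).mpr ?_, ?_⟩
      · exact List.mem_flatten.mpr ⟨m0, by simp, (hmatch m0 (by simp)).1⟩
      · have := (hcnt token).mpr hall
        simp only [beq_iff_eq]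
        rw [hF]; exact_mod_cast this
    rw [hitems, PySem.Set.ofList_eq_self_of_nodup _ hnodB]
    simp only [PySem.Set.remove?_of_mem htokB]
    -- the two element lists are permutations of one another, hence sort equal
    have hperm : ((ms.foldl (fun acc lt => PySem.Set.inter acc lt) m0).discard token).Perm
        (PySem.Set.discard ((PySem.Set.ofList F).filter
          (fun k => (F.count k : Int) == ((m0 :: ms).length : Int))) token) := by
      apply (List.perm_ext_iff_of_nodup
        (PySem.Set.nodup_discard _ _ (nodup_foldl_inter ms m0 (hmatch m0 (by simp)).2))
        (PySem.Set.nodup_discard _ _ hnodB)).mpr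
      intro x
      rw [PySem.Set.mem_discard, PySem.Set.mem_discard, mem_foldl_inter, List.mem_filter,
          PySem.Set.mem_ofList]
      constructor
      · rintro ⟨⟨hm0, hms⟩, hne⟩
        have hall : ∀ lt ∈ m0 :: ms, x ∈ lt := by
          intro lt hm
          rcases List.mem_cons.mp hm with rfl | hm' <;> [exact hm0; exact hms lt hm']
        refine ⟨⟨List.mem_flatten.mpr ⟨m0, by simp, hm0⟩, ?_⟩, hne⟩
        have := (hcnt x).mpr hall
        simp only [beq_iff_eq]
        rw [hF]; exact_mod_cast this
      · rintro ⟨⟨_, hc⟩, hne⟩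
        simp only [beq_iff_eq] at hc
        have hall : ∀ lt ∈ m0 :: ms, x ∈ lt := (hcnt x).mp (by rw [hF] at hc; exact_mod_cast hc)
        exact ⟨⟨hall m0 (by simp), fun lt hm => hall lt (by simp [hm])⟩, hne⟩
    rw [PySem.List.sorted_eq_sorted_of_perm _ _ (fun x => x) (fun _ _ h => h) hperm,
        join_eq_foldl]
    show (PySem.List.sorted _ (fun x => x) false).foldl
          (fun acc x => acc ++ " + " ++ x) ((token ++ " = ") ++ token) ++ ";" = _
    rw [foldl_prefix]
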